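-- pv_equiv track=rewrite | github.com/rmscoal/algoDS | python/leetcode/hash/make_array_empty.py | minOperationsSlow
-- ===== SOURCE A (Python) =====
-- from typing import List
--
-- def minOperationsSlow(nums: List[int]) -> int:
--     count_map = {}
--     ways = 0
--     for i in nums:
--         if i in count_map:
--             count_map[i] += 1
--         else:
--             count_map[i] = 1
--
--     for key in count_map:
--         count = count_map[key]
--         found = False
--         for i in range(count // 3, -1, -1):
--             for j in range(count // 2, -1, -1):
--                 if ((3 * i) + (2 * j)) == count:
--                     found = True
--                     ways += i + j
--                     break
--             if found:
--                 break
--         if not found: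
--             return -1
--
--     return ways
-- ===== SOURCE B (Python) =====
-- def minOperationsSlow(nums):
--     counts = {}
--     for x in nums:
--         counts[x] = counts.get(x, 0) + 1
--     total = 0
--     for c in counts.values():
--         if c == 1:
--             return -1
--         total += (c + 2) // 3
--     return total
-- ===== Notes on version B (the rewrite author's own statement) =====
-- stated objective: alternative
-- what changed: replaces A's per-key nested countdown search over (i,j) pairs with the closed form per frequency c: impossible iff c == 1, otherwise ceil(c/3) = (c+2)//3 operations.
import Mathlib
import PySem

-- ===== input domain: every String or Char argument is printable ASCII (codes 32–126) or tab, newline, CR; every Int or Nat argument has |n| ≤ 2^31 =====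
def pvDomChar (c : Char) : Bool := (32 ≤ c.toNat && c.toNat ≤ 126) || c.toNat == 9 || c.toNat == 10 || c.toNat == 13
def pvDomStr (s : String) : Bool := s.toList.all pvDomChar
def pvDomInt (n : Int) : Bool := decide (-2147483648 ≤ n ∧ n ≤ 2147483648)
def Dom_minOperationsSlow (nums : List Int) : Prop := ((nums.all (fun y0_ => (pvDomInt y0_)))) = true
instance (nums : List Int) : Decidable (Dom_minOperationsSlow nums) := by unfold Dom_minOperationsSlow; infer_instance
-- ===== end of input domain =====

-- B replaces A's per-key nested countdown search for 3i+2j = count with the closed form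
-- (-1 if count == 1 else (count+2)//3); objective: alternative (a closed form instead of the search).

-- ===== PORT A =====
-- inner 'for j in range(count // 2, -1, -1)' loop with its break (first match wins)
def pvInner (c i : Int) : List Int → Option Int
  | [] => none
  | j :: js => if 3 * i + 2 * j = c then some (i + j) else pvInner c i js

-- outer 'for i in range(count // 3, -1, -1)' loop with the found flag / break
def pvOuter (c : Int) : List Int → Option Int
  | [] => none
  | i :: is =>
    match pvInner c i (PySem.List.pyRange (PySem.Int.floordiv c 2) (-1) (-1)) with
    | some w => some w
    | none => pvOuter c is

-- 'for key in count_map' loop: accumulate ways, early return -1 when not found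
def pvLoopA (d : PySem.Dict Int Int) (ways : Int) : List Int → Int
  | [] => ways
  | k :: ks =>
    let count := d.getD k 0
    match pvOuter count (PySem.List.pyRange (PySem.Int.floordiv count 3) (-1) (-1)) with
    | some w => pvLoopA d (ways + w) ks
    | none => -1

def minOperationsSlow (nums : List Int) : Int :=
  let cm := nums.foldl
    (fun d i => if d.contains i then d.modify i 0 (· + 1) else d.insert i 1)
    PySem.Dict.empty
  pvLoopA cm 0 cm.keys

-- ===== PORT B =====
-- 'for c in counts.values()' loop: -1 on a singleton, else add ceil(c/3)
def pvLoopB (total : Int) : List Int → Int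
  | [] => total
  | c :: cs => if c = 1 then -1 else pvLoopB (total + PySem.Int.floordiv (c + 2) 3) cs

def minOperationsSlow_alt (nums : List Int) : Int :=
  let counts := nums.foldl (fun d x => d.insert x (d.getD x 0 + 1)) PySem.Dict.empty
  pvLoopB 0 counts.values

-- ===== PRECONDITION & SPEC =====
def Spec_minOperationsSlow (nums : List Int) (out : Int) : Prop := out = minOperationsSlow_alt nums
instance (nums : List Int) (out : Int) : Decidable (Spec_minOperationsSlow nums out) := by unfold Spec_minOperationsSlow; infer_instance

-- ===== CLAIM (what is proved, stated in full; the proofs are below) =====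
def Claim_equal_minOperationsSlow : Prop := ∀ (nums : List Int), Dom_minOperationsSlow nums → Spec_minOperationsSlow nums (minOperationsSlow nums)

-- ===== LEMMAS AND PROOFS =====

-- A's build step ('if i in count_map: += 1 else: = 1') is exactly Counter's modify step
theorem pvBuildA_eq_counter (nums : List Int) :
    nums.foldl (fun d i => if d.contains i then d.modify i 0 (· + 1) else d.insert i 1)
      PySem.Dict.empty = PySem.Dict.counter nums := by
  have hf : (fun (d : PySem.Dict Int Int) (i : Int) =>
      if d.contains i then d.modify i 0 (· + 1) else d.insert i 1)
      = fun d i => d.modify i 0 (· + 1) := by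
    funext d i
    by_cases h : d.contains i = true
    · simp [h]
    · have h' : d.contains i = false := by simpa using h
      have h2 : d.get? i = none := by
        rw [PySem.Dict.contains_eq_isSome_get?] at h'
        exact Option.not_isSome_iff_eq_none.mp (by simp [h'])
      simp [h', PySem.Dict.modify, PySem.Dict.insert, PySem.Dict.getD, h2]
  rw [hf, PySem.Dict.counter_eq_foldl]

theorem pvInner_none (c i : Int) (js : List Int) (h : ∀ x ∈ js, 3 * i + 2 * x ≠ c) :
    pvInner c i js = none := by
  induction js with
  | nil => rfl
  | cons j js ih =>
    simp only [pvInner, if_neg (h j (by simp))]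
    exact ih fun x hx => h x (by simp [hx])

theorem pvInner_some (c i j0 : Int) (js : List Int) (hmem : j0 ∈ js)
    (heq : 3 * i + 2 * j0 = c) (huniq : ∀ x ∈ js, 3 * i + 2 * x = c → x = j0) :
    pvInner c i js = some (i + j0) := by
  induction js with
  | nil => cases hmem
  | cons j js ih =>
    by_cases hj : 3 * i + 2 * j = c
    · have := huniq j (by simp) hj
      simp only [pvInner, this, if_pos heq]
    · have hmem' : j0 ∈ js := by
        rcases List.mem_cons.mp hmem with h | h
        · exact absurd (h ▸ heq) hj
        · exact h
      simp only [pvInner, if_neg hj]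
      exact ih hmem' fun x hx => huniq x (by simp [hx])

theorem pvInner_range_some (c i j0 : Int) (hi : 0 ≤ i) (hj : 0 ≤ j0)
    (heq : 3 * i + 2 * j0 = c) :
    pvInner c i (PySem.List.pyRange (PySem.Int.floordiv c 2) (-1) (-1)) = some (i + j0) := by
  apply pvInner_some
  · rw [PySem.List.mem_pyRange_neg_one]
    refine ⟨by omega, ?_⟩
    rw [PySem.Int.le_floordiv_iff_mul_le (by norm_num)]
    omega
  · exact heq
  · intro x _ hx; omega

theorem pvInner_range_none (c i : Int) (hodd : ¬ (2 ∣ (c - 3 * i))) :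
    pvInner c i (PySem.List.pyRange (PySem.Int.floordiv c 2) (-1) (-1)) = none := by
  apply pvInner_none
  intro x _ hx
  exact hodd ⟨x, by omega⟩

-- the per-frequency closed form of A's nested search
theorem pvSearch_eq (c : Int) (hc : 1 ≤ c) :
    pvOuter c (PySem.List.pyRange (PySem.Int.floordiv c 3) (-1) (-1))
      = if c = 1 then none else some (PySem.Int.floordiv (c + 2) 3) := by
  have hq3 : PySem.Int.floordiv c 3 * 3 + PySem.Int.mod c 3 = c := PySem.Int.floordiv_mul_add_mod c 3
  have hr0 : 0 ≤ PySem.Int.mod c 3 := PySem.Int.mod_nonneg c (by norm_num)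
  have hr3 : PySem.Int.mod c 3 < 3 := PySem.Int.mod_lt c (by norm_num)
  set q := PySem.Int.floordiv c 3 with hqdef
  set r := PySem.Int.mod c 3 with hrdef
  have hq0 : 0 ≤ q := by
    rw [hqdef, PySem.Int.le_floordiv_iff_mul_le (by norm_num)]
    omega
  rw [PySem.List.pyRange_neg_one_cons (by omega : (-1:Int) < q)]
  interval_cases r
  · -- c = 3q : take i = q, j = 0
    have hv : PySem.Int.floordiv (c + 2) 3 = q :=
      (PySem.Int.floordiv_eq_iff_of_pos (by norm_num)).mpr ⟨by omega, by omega⟩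
    simp only [pvOuter, pvInner_range_some c q 0 hq0 (by norm_num) (by omega)]
    rw [if_neg (by omega), hv]
    norm_num
  · -- c = 3q + 1 : i = q fails (odd remainder)
    have hfail : pvInner c q (PySem.List.pyRange (PySem.Int.floordiv c 2) (-1) (-1)) = none :=
      pvInner_range_none c q (by intro ⟨t, ht⟩; omega)
    simp only [pvOuter, hfail]
    by_cases hq1 : q = 0
    · -- c = 1 : remaining range is empty, not found
      rw [if_pos (by omega)]
      rw [PySem.List.pyRange_neg_one_eq_nil (by omega : q - 1 ≤ -1)]
      rfl
    · -- c ≥ 4 : i = q - 1, j = 2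
      have hv : PySem.Int.floordiv (c + 2) 3 = q + 1 :=
        (PySem.Int.floordiv_eq_iff_of_pos (by norm_num)).mpr ⟨by omega, by omega⟩
      rw [PySem.List.pyRange_neg_one_cons (by omega : (-1:Int) < q - 1)]
      simp only [pvOuter, pvInner_range_some c (q - 1) 2 (by omega) (by norm_num) (by omega)]
      rw [if_neg (by omega), hv]
      norm_num
      omega
  · -- c = 3q + 2 : take i = q, j = 1
    have hv : PySem.Int.floordiv (c + 2) 3 = q + 1 :=
      (PySem.Int.floordiv_eq_iff_of_pos (by norm_num)).mpr ⟨by omega, by omega⟩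
    simp only [pvOuter, pvInner_range_some c q 1 hq0 (by norm_num) (by omega)]
    rw [if_neg (by omega), hv]

theorem pvLoops_eq (d : PySem.Dict Int Int) (ks : List Int)
    (h : ∀ k ∈ ks, 1 ≤ d.getD k 0) (w : Int) :
    pvLoopA d w ks = pvLoopB w (ks.map (fun k => d.getD k 0)) := by
  induction ks generalizing w with
  | nil => rfl
  | cons k ks ih =>
    have hc : 1 ≤ d.getD k 0 := h k (by simp)
    simp only [pvLoopA, List.map_cons, pvLoopB, pvSearch_eq (d.getD k 0) hc]
    by_cases h1 : d.getD k 0 = 1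
    · rw [if_pos h1, if_pos h1]
    · rw [if_neg h1, if_neg h1]
      exact ih (fun x hx => h x (by simp [hx])) _

-- ===== VERDICT (by name: the statement is the Claim_ definition above) =====
theorem minOperationsSlow_spec : Claim_equal_minOperationsSlow := by
  intro nums _
  unfold Spec_minOperationsSlow minOperationsSlow minOperationsSlow_alt
  rw [pvBuildA_eq_counter, PySem.Dict.foldl_insert_getD_add_one_eq_counter]
  have hnd := PySem.Dict.nodup_keys_counter (xs := nums)
  show pvLoopA (PySem.Dict.counter nums) 0 (PySem.Dict.counter nums).keys
      = pvLoopB 0 (PySem.Dict.counter nums).values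
  rw [PySem.Dict.values_eq_map_keys (PySem.Dict.counter nums) hnd 0]
  apply pvLoops_eq
  intro k hk
  rw [PySem.Dict.keys_counter, PySem.Set.mem_ofList] at hk
  rw [PySem.Dict.getD_counter]
  have := List.count_pos_iff.mpr hk
  omega
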